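-- pv_equiv track=rewrite | github.com/daaffaaz/tugas-akhir-be | apps/rag/knowledge_graph.py | build_prereq_chain
-- ===== SOURCE A (Python) =====
-- BEGINNER_KEYWORDS = [
--     'fundamentals', 'introduction', 'basics', 'beginner',
--     'getting started', 'essentials', 'overview', 'starter',
--     'fundamental', 'intro', 'basic',
-- ]
--
-- INTERMEDIATE_KEYWORDS = [
--     'intermediate', 'applied', 'practical', 'hands-on',
--     'applied', 'building', 'developing', 'with',
-- ]
--
-- ADVANCED_KEYWORDS = [
--     'advanced', 'expert', 'master', 'professional',
--     'specialization', 'capstone', 'senior', 'deep',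
-- ]
--
-- def _level_from_keywords(title: str, tags: str, level: str) -> int:
--     """Return 0=beginner, 1=intermediate, 2=advanced based on keyword scan."""
--     combined = (title + ' ' + tags).lower()
--
--     if any(k in combined for k in ADVANCED_KEYWORDS):
--         return 2
--     if any(k in combined for k in INTERMEDIATE_KEYWORDS):
--         return 1
--     if any(k in combined for k in BEGINNER_KEYWORDS):
--         return 0
--
--     # Fallback to explicit level field
--     level_lower = level.lower() if level else ''
--     if 'beginner' in level_lower or 'easy' in level_lower:
--         return 0
--     if 'intermediate' in level_lower or 'medium' in level_lower:
--         return 1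
--     if 'advanced' in level_lower or 'hard' in level_lower:
--         return 2
--
--     return 1  # default to intermediate
--
-- def build_prereq_chain(courses_metadata: list[dict]) -> str:
--     """
--     Given a list of retrieved course metadata dicts (from FAISS),
--     sort them by learning order and return a formatted prerequisite chain string.
--     """
--     if not courses_metadata:
--         return "No courses retrieved."
--
--     # Add sort key
--     sorted_courses = sorted(
--         courses_metadata,
--         key=lambda c: _level_from_keywords(
--             c.get('title', ''), c.get('tags', ''), c.get('level', '')
--         )
--     )
--
--     # Build readable chain
--     lines = []
--     current_level = None
--     for i, course in enumerate(sorted_courses, 1):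
--         level = _level_from_keywords(
--             course.get('title', ''), course.get('tags', ''), course.get('level', '')
--         )
--         level_label = ['Foundation', 'Intermediate', 'Advanced'][level]
--
--         if level != current_level:
--             lines.append(f"\n[{level_label} Level]")
--             current_level = level
--
--         title = course.get('title', 'Unknown')[:70]
--         duration = course.get('duration', 'N/A')
--         lines.append(f"  {i}. {title} ({duration})")
--
--     return '\n'.join(lines)
-- ===== SOURCE B (Python) =====
-- BEGINNER_KEYWORDS = [
--     'fundamentals', 'introduction', 'basics', 'beginner',
--     'getting started', 'essentials', 'overview', 'starter',
--     'fundamental', 'intro', 'basic',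
-- ]
--
-- INTERMEDIATE_KEYWORDS = [
--     'intermediate', 'applied', 'practical', 'hands-on',
--     'applied', 'building', 'developing', 'with',
-- ]
--
-- ADVANCED_KEYWORDS = [
--     'advanced', 'expert', 'master', 'professional',
--     'specialization', 'capstone', 'senior', 'deep',
-- ]
--
-- def _level_from_keywords(title: str, tags: str, level: str) -> int:
--     combined = (title + ' ' + tags).lower()
--     if any(k in combined for k in ADVANCED_KEYWORDS):
--         return 2
--     if any(k in combined for k in INTERMEDIATE_KEYWORDS):
--         return 1
--     if any(k in combined for k in BEGINNER_KEYWORDS):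
--         return 0
--     level_lower = level.lower() if level else ''
--     if 'beginner' in level_lower or 'easy' in level_lower:
--         return 0
--     if 'intermediate' in level_lower or 'medium' in level_lower:
--         return 1
--     if 'advanced' in level_lower or 'hard' in level_lower:
--         return 2
--     return 1
--
-- def build_prereq_chain(courses_metadata: list[dict]) -> str:
--     """Bucket partition by level (computed once per course) instead of a comparison sort."""
--     if not courses_metadata:
--         return "No courses retrieved."
--
--     buckets = [[], [], []]
--     for course in courses_metadata:
--         lvl = _level_from_keywords(
--             course.get('title', ''), course.get('tags', ''), course.get('level', '')
--         )
--         buckets[lvl].append(course)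
--
--     lines = []
--     i = 1
--     for lvl, label in enumerate(['Foundation', 'Intermediate', 'Advanced']):
--         if buckets[lvl]:
--             lines.append(f"\n[{label} Level]")
--             for course in buckets[lvl]:
--                 title = course.get('title', 'Unknown')[:70]
--                 duration = course.get('duration', 'N/A')
--                 lines.append(f"  {i}. {title} ({duration})")
--                 i += 1
--     return '\n'.join(lines)
-- ===== Notes on version B (the rewrite author's own statement) =====
-- stated objective: alternative
-- what changed: Replaces the stable comparison sort plus a level-change-detecting enumerate loop by a single-pass 3-way bucket partition (each course's level computed once) followed by an in-order emission of the non-empty buckets with one running counter.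
import Mathlib
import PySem

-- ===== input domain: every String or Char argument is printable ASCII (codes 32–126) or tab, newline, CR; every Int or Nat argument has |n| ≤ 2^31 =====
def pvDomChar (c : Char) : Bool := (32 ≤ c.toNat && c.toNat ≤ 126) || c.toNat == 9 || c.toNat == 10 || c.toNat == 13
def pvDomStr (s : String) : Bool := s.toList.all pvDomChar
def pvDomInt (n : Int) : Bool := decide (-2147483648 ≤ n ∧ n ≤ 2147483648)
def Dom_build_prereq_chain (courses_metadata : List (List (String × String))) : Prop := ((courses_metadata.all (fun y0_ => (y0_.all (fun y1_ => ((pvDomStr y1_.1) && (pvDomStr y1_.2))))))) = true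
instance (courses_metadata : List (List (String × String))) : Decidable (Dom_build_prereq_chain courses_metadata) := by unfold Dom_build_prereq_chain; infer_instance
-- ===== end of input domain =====

-- B replaces A's stable comparison sort + level-change-detecting loop by a one-pass
-- 3-way bucket partition followed by an in-order emission with a running counter (objective: alternative algorithm, same cost).

-- ===== PORT A =====
-- shared module constants and helper (used verbatim by A and B in Python)
def pvBeginnerKeywords : List String :=
  ["fundamentals", "introduction", "basics", "beginner",
   "getting started", "essentials", "overview", "starter",
   "fundamental", "intro", "basic"]

def pvIntermediateKeywords : List String :=
  ["intermediate", "applied", "practical", "hands-on",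
   "applied", "building", "developing", "with"]

def pvAdvancedKeywords : List String :=
  ["advanced", "expert", "master", "professional",
   "specialization", "capstone", "senior", "deep"]

def _level_from_keywords (title : String) (tags : String) (level : String) : Nat :=
  let combined := PySem.Str.lower (title ++ " " ++ tags)
  if pvAdvancedKeywords.any (fun k => PySem.Str.isIn k combined) then 2
  else if pvIntermediateKeywords.any (fun k => PySem.Str.isIn k combined) then 1
  else if pvBeginnerKeywords.any (fun k => PySem.Str.isIn k combined) then 0
  else
    let level_lower := if level ≠ "" then PySem.Str.lower level else ""
    if PySem.Str.isIn "beginner" level_lower || PySem.Str.isIn "easy" level_lower then 0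
    else if PySem.Str.isIn "intermediate" level_lower || PySem.Str.isIn "medium" level_lower then 1
    else if PySem.Str.isIn "advanced" level_lower || PySem.Str.isIn "hard" level_lower then 2
    else 1

-- the level of one course dict: _level_from_keywords(c.get('title',''), c.get('tags',''), c.get('level',''))
def pvLevelOf (c : List (String × String)) : Nat :=
  _level_from_keywords ((PySem.Dict.mk c).getD "title" "") ((PySem.Dict.mk c).getD "tags" "")
    ((PySem.Dict.mk c).getD "level" "")

-- ['Foundation', 'Intermediate', 'Advanced'][level]  (level is always 0/1/2, see pvLevelOf_le_two below)
def pvLabel (lvl : Nat) : String := ["Foundation", "Intermediate", "Advanced"].getD lvl ""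

-- f"  {i}. {course.get('title','Unknown')[:70]} ({course.get('duration','N/A')})"  (identical f-string in A and B)
def pvLine (c : List (String × String)) (i : Int) : String :=
  "  " ++ PySem.Int.toStr i ++ ". " ++
    PySem.Str.slice ((PySem.Dict.mk c).getD "title" "Unknown") none (some 70) ++
    " (" ++ (PySem.Dict.mk c).getD "duration" "N/A" ++ ")"

-- A's 'for i, course in enumerate(sorted_courses, 1)' loop; state = (i, current_level, lines)
def pvLoopA : List (List (String × String)) → Int → Option Nat → List String → List String
  | [], _, _, lines => lines
  | c :: cs, i, cur, lines =>
    let lvl := pvLevelOf c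
    let lines' := if some lvl ≠ cur then lines ++ ["\n[" ++ pvLabel lvl ++ " Level]"] else lines
    let cur' := if some lvl ≠ cur then some lvl else cur
    pvLoopA cs (i + 1) cur' (lines' ++ [pvLine c i])

def build_prereq_chain (courses_metadata : List (List (String × String))) : String :=
  if courses_metadata = [] then "No courses retrieved."
  else
    let sorted_courses := PySem.List.sorted courses_metadata (fun c => pvLevelOf c)
    PySem.Str.join "\n" (pvLoopA sorted_courses 1 none [])

-- ===== PORT B =====
-- one pass over the input, appending each course to its level's bucket
def pvBuckets : List (List (String × String)) →
    List (List (String × String)) × List (List (String × String)) × List (List (String × String)) →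
    List (List (String × String)) × List (List (String × String)) × List (List (String × String))
  | [], b => b
  | c :: cs, (b0, b1, b2) =>
    let lvl := pvLevelOf c
    pvBuckets cs
      (if lvl = 0 then (b0 ++ [c], b1, b2)
       else if lvl = 1 then (b0, b1 ++ [c], b2)
       else (b0, b1, b2 ++ [c]))

-- the inner 'for course in buckets[lvl]' loop: numbered lines plus the updated counter
def pvEmit : List (List (String × String)) → Int → List String × Int
  | [], i => ([], i)
  | c :: cs, i => (pvLine c i :: (pvEmit cs (i + 1)).1, (pvEmit cs (i + 1)).2)

-- one iteration of 'for lvl, label in enumerate([...])': header + numbered lines if the bucket is non-empty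
def pvEmitLevel (label : String) (b : List (List (String × String))) (acc : List String × Int) :
    List String × Int :=
  if b = [] then acc
  else (acc.1 ++ ("\n[" ++ label ++ " Level]") :: (pvEmit b acc.2).1, (pvEmit b acc.2).2)

def build_prereq_chain_alt (courses_metadata : List (List (String × String))) : String :=
  if courses_metadata = [] then "No courses retrieved."
  else
    let b := pvBuckets courses_metadata ([], [], [])
    let r := pvEmitLevel "Advanced" b.2.2 (pvEmitLevel "Intermediate" b.2.1
               (pvEmitLevel "Foundation" b.1 ([], 1)))
    PySem.Str.join "\n" r.1

-- ===== PRECONDITION & SPEC =====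
def Spec_build_prereq_chain (courses_metadata : List (List (String × String))) (out : String) : Prop := out = build_prereq_chain_alt courses_metadata
instance (courses_metadata : List (List (String × String))) (out : String) : Decidable (Spec_build_prereq_chain courses_metadata out) := by unfold Spec_build_prereq_chain; infer_instance

-- ===== CLAIM (what is proved, stated in full; the proofs are below) =====
def Claim_equal_build_prereq_chain : Prop := ∀ (courses_metadata : List (List (String × String))), Dom_build_prereq_chain courses_metadata → Spec_build_prereq_chain courses_metadata (build_prereq_chain courses_metadata)

-- ===== LEMMAS AND PROOFS =====

theorem pvLevelOf_le_two (c : List (String × String)) : pvLevelOf c ≤ 2 := by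
  unfold pvLevelOf _level_from_keywords
  dsimp only
  split_ifs <;> omega

theorem insertBy_append {α : Type} (before : α → α → Bool)
    (x : α) (ys zs : List α)
    (h1 : ∀ y ∈ ys, before x y = false)
    (h2 : ∀ z, zs.head? = some z → before x z = true) :
    PySem.List.insertBy before x (ys ++ zs) = ys ++ x :: zs := by
  induction ys with
  | nil =>
    cases zs with
    | nil => simp [PySem.List.insertBy]
    | cons z zs => simp [PySem.List.insertBy, h2 z rfl]
  | cons y ys ih =>
    have hy : before x y = false := h1 y (by simp)
    simp [PySem.List.insertBy, hy]
    exact ih (fun y hy => h1 y (by simp [hy]))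

theorem buckets_eq_filters (cs : List (List (String × String)))
    (b0 b1 b2 : List (List (String × String))) :
    pvBuckets cs (b0, b1, b2) =
      (b0 ++ cs.filter (fun c => pvLevelOf c == 0),
       b1 ++ cs.filter (fun c => pvLevelOf c == 1),
       b2 ++ cs.filter (fun c => pvLevelOf c == 2)) := by
  induction cs generalizing b0 b1 b2 with
  | nil => simp [pvBuckets]
  | cons c cs ih =>
    have hle := pvLevelOf_le_two c
    by_cases h0 : pvLevelOf c = 0
    · simp [pvBuckets, h0, ih]
    · by_cases h1 : pvLevelOf c = 1
      · simp [pvBuckets, h1, ih]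
      · have h2 : pvLevelOf c = 2 := by omega
        simp [pvBuckets, h2, ih]

theorem foldl_insertBy_buckets (cs : List (List (String × String)))
    (b0 b1 b2 : List (List (String × String)))
    (hb0 : ∀ c ∈ b0, pvLevelOf c = 0) (hb1 : ∀ c ∈ b1, pvLevelOf c = 1)
    (hb2 : ∀ c ∈ b2, pvLevelOf c = 2) :
    cs.foldl (fun acc x => PySem.List.insertBy (fun a b => decide (pvLevelOf a < pvLevelOf b)) x acc)
        (b0 ++ b1 ++ b2) =
      (b0 ++ cs.filter (fun c => pvLevelOf c == 0)) ++
      (b1 ++ cs.filter (fun c => pvLevelOf c == 1)) ++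
      (b2 ++ cs.filter (fun c => pvLevelOf c == 2)) := by
  induction cs generalizing b0 b1 b2 with
  | nil => simp
  | cons c cs ih =>
    have hle := pvLevelOf_le_two c
    simp only [List.foldl_cons, List.filter_cons]
    by_cases h0 : pvLevelOf c = 0
    · have hins : PySem.List.insertBy (fun a b => decide (pvLevelOf a < pvLevelOf b)) c
          (b0 ++ b1 ++ b2) = b0 ++ c :: (b1 ++ b2) := by
        rw [List.append_assoc]
        apply insertBy_append
        · intro y hy
          have := hb0 y hy
          simp [this, h0]
        · intro z hz
          have hzmem : z ∈ b1 ++ b2 := List.mem_of_mem_head? hz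
          rcases List.mem_append.mp hzmem with h | h
          · have := hb1 z h; simp [this, h0]
          · have := hb2 z h; simp [this, h0]
      rw [hins]
      have : b0 ++ c :: (b1 ++ b2) = (b0 ++ [c]) ++ b1 ++ b2 := by simp
      have hb0' : ∀ x ∈ b0 ++ [c], pvLevelOf x = 0 := by
        intro x hx
        rcases List.mem_append.mp hx with h | h
        · exact hb0 x h
        · simp at h; subst h; exact h0
      rw [this, ih (b0 ++ [c]) b1 b2 hb0' hb1 hb2]
      simp [h0]
    · by_cases h1 : pvLevelOf c = 1
      · have hins : PySem.List.insertBy (fun a b => decide (pvLevelOf a < pvLevelOf b)) c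
            (b0 ++ b1 ++ b2) = (b0 ++ b1) ++ c :: b2 := by
          rw [List.append_assoc, ← List.append_assoc]
          apply insertBy_append
          · intro y hy
            rcases List.mem_append.mp hy with h | h
            · have := hb0 y h; simp [this, h1]
            · have := hb1 y h; simp [this, h1]
          · intro z hz
            have hzmem : z ∈ b2 := List.mem_of_mem_head? hz
            have := hb2 z hzmem; simp [this, h1]
        rw [hins]
        have : (b0 ++ b1) ++ c :: b2 = b0 ++ (b1 ++ [c]) ++ b2 := by simp
        have hb1' : ∀ x ∈ b1 ++ [c], pvLevelOf x = 1 := by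
          intro x hx
          rcases List.mem_append.mp hx with h | h
          · exact hb1 x h
          · simp at h; subst h; exact h1
        rw [this, ih b0 (b1 ++ [c]) b2 hb0 hb1' hb2]
        simp [h1]
      · have h2 : pvLevelOf c = 2 := by omega
        have hins : PySem.List.insertBy (fun a b => decide (pvLevelOf a < pvLevelOf b)) c
            (b0 ++ b1 ++ b2) = (b0 ++ b1 ++ b2) ++ [c] := by
          apply PySem.List.insertBy_of_forall_not_before
          intro y hy
          rcases List.mem_append.mp hy with h | h
          · rcases List.mem_append.mp h with h' | h'
            · have := hb0 y h'; simp [this, h2]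
            · have := hb1 y h'; simp [this, h2]
          · have := hb2 y h; simp [this, h2]
        rw [hins]
        have : (b0 ++ b1 ++ b2) ++ [c] = b0 ++ b1 ++ (b2 ++ [c]) := by simp
        have hb2' : ∀ x ∈ b2 ++ [c], pvLevelOf x = 2 := by
          intro x hx
          rcases List.mem_append.mp hx with h | h
          · exact hb2 x h
          · simp at h; subst h; exact h2
        rw [this, ih b0 b1 (b2 ++ [c]) hb0 hb1 hb2']
        simp [h2]

theorem sorted_eq_filters (cm : List (List (String × String))) :
    PySem.List.sorted cm (fun c => pvLevelOf c) =
      cm.filter (fun c => pvLevelOf c == 0) ++ cm.filter (fun c => pvLevelOf c == 1) ++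
        cm.filter (fun c => pvLevelOf c == 2) := by
  rw [PySem.List.sorted_eq_foldl_insertBy]
  have := foldl_insertBy_buckets cm [] [] [] (by simp) (by simp) (by simp)
  simpa using this

theorem pvEmit_snd (cs : List (List (String × String))) (i : Int) :
    (pvEmit cs i).2 = i + cs.length := by
  induction cs generalizing i with
  | nil => simp [pvEmit]
  | cons c cs ih => simp [pvEmit, ih]; omega

-- A's loop through a constant-level run whose level equals current_level
theorem loopA_run (k : Nat) (cs rest : List (List (String × String))) (i : Int)
    (lines : List String) (hmem : ∀ c ∈ cs, pvLevelOf c = k) :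
    pvLoopA (cs ++ rest) i (some k) lines =
      pvLoopA rest (i + cs.length) (some k) (lines ++ (pvEmit cs i).1) := by
  induction cs generalizing i lines with
  | nil => simp [pvEmit]
  | cons c cs ih =>
    have hc : pvLevelOf c = k := hmem c (by simp)
    simp only [List.cons_append, pvLoopA, hc, pvEmit]
    rw [if_neg (by simp), if_neg (by simp)]
    rw [ih (i + 1) _ (fun c hc => hmem c (by simp [hc]))]
    have harg : i + 1 + (cs.length : Int) = i + ((cs.length + 1 : Nat) : Int) := by push_cast; ring
    rw [List.length_cons, harg]
    simp [List.append_assoc]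

-- one whole bucket of A's loop = one pvEmitLevel step of B
theorem loopA_bucket (k : Nat) (cs rest : List (List (String × String))) (i : Int)
    (cur : Option Nat) (lines : List String)
    (hmem : ∀ c ∈ cs, pvLevelOf c = k) (hcur : cur ≠ some k) :
    pvLoopA (cs ++ rest) i cur lines =
      pvLoopA rest (pvEmitLevel (pvLabel k) cs (lines, i)).2
        (if cs = [] then cur else some k) (pvEmitLevel (pvLabel k) cs (lines, i)).1 := by
  cases cs with
  | nil => simp [pvEmitLevel]
  | cons c cs =>
    have hc : pvLevelOf c = k := hmem c (by simp)
    simp only [List.cons_append, pvLoopA, hc]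
    rw [if_pos (by simpa using (Ne.symm hcur)), if_pos (by simpa using (Ne.symm hcur))]
    rw [loopA_run k cs rest (i + 1) _ (fun c hc => hmem c (by simp [hc]))]
    simp only [pvEmitLevel, if_neg (by simp : ¬ (c :: cs = [])), pvEmit]
    rw [pvEmit_snd]
    simp [List.append_assoc]

-- ===== VERDICT (by name: the statement is the Claim_ definition above) =====
theorem build_prereq_chain_spec : Claim_equal_build_prereq_chain := by
  intro cm _
  unfold Spec_build_prereq_chain build_prereq_chain build_prereq_chain_alt
  by_cases hnil : cm = []
  · simp [hnil]
  · simp only [if_neg hnil]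
    rw [buckets_eq_filters, sorted_eq_filters]
    set f0 := cm.filter (fun c => pvLevelOf c == 0) with hf0
    set f1 := cm.filter (fun c => pvLevelOf c == 1) with hf1
    set f2 := cm.filter (fun c => pvLevelOf c == 2) with hf2
    have hm0 : ∀ c ∈ f0, pvLevelOf c = 0 := by intro c hc; rw [hf0] at hc; simpa using (List.of_mem_filter hc)
    have hm1 : ∀ c ∈ f1, pvLevelOf c = 1 := by intro c hc; rw [hf1] at hc; simpa using (List.of_mem_filter hc)
    have hm2 : ∀ c ∈ f2, pvLevelOf c = 2 := by intro c hc; rw [hf2] at hc; simpa using (List.of_mem_filter hc)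
    simp only [List.nil_append]
    rw [List.append_assoc, loopA_bucket 0 f0 (f1 ++ f2) 1 none [] hm0 (by simp)]
    rw [loopA_bucket 1 f1 f2 _ _ _ hm1 (by split_ifs <;> simp)]
    have h2' := loopA_bucket 2 f2 [] (pvEmitLevel (pvLabel 1) f1 (pvEmitLevel (pvLabel 0) f0 ([], 1))).2
      (if f1 = [] then (if f0 = [] then none else some 0) else some 1)
      (pvEmitLevel (pvLabel 1) f1 (pvEmitLevel (pvLabel 0) f0 ([], 1))).1 hm2 (by split_ifs <;> simp)
    rw [List.append_nil] at h2'
    rw [h2']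
    simp only [pvLoopA]
    simp [pvLabel, List.getD]
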